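-- pv_equiv track=rewrite | github.com/evanchen83/pokemon-bot | bot/commands/open_pack.py | _categorize_cards
-- ===== SOURCE A (Python) =====
-- from collections import defaultdict
-- from typing import Dict, List
--
-- RARITY_TIERS = {
--     "common": {
--         "names": {"common"},
--         "weight": 60,
--     },
--     "uncommon": {
--         "names": {"uncommon"},
--         "weight": 25,
--     },
--     "rare": {
--         "names": {
--             "rare",
--             "rare holo",
--             "rare ace",
--             "rare break",
--             "rare prism star",
--             "rare shining",
--             "rare shiny",
--             "rare holo star",
--             "trainer gallery rare holo",
--             "black white rare",
--             "legend",
--             "rare prime",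
--             "illustration rare",
--         },
--         "weight": 10,
--     },
--     "ultra_rare": {
--         "names": {
--             "rare holo ex",
--             "rare holo gx",
--             "rare holo lv.x",
--             "rare holo v",
--             "rare holo vmax",
--             "rare holo vstar",
--             "ultra rare",
--             "double rare",
--             "rare ultra",
--             "shiny rare",
--             "amazing rare",
--             "radiant rare",
--             "classic collection",
--             "ace spec rare",
--             "promo",
--         },
--         "weight": 4,
--     },
--     "secret_rare": {
--         "names": {
--             "rare shiny gx",
--             "rare rainbow",
--             "rare secret",
--             "shiny ultra rare",
--             "special illustration rare",
--             "hyper rare",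
--         },
--         "weight": 1,
--     },
-- }
--
-- def _categorize_cards(cards: List[dict]) -> Dict[str, List[dict]]:
--     categorized = defaultdict(list)
--     for card in cards:
--         rarity = card.get("rarity", "").lower()
--         for tier, data in RARITY_TIERS.items():
--             if rarity in {r.lower() for r in data["names"]}:
--                 categorized[tier].append(card)
--                 break
--     return categorized
-- ===== SOURCE B (Python) =====
-- from collections import defaultdict
-- from typing import Dict, List
--
-- RARITY_TIERS = {
--     "common": {
--         "names": {"common"},
--         "weight": 60,
--     },
--     "uncommon": {
--         "names": {"uncommon"},
--         "weight": 25,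
--     },
--     "rare": {
--         "names": {
--             "rare",
--             "rare holo",
--             "rare ace",
--             "rare break",
--             "rare prism star",
--             "rare shining",
--             "rare shiny",
--             "rare holo star",
--             "trainer gallery rare holo",
--             "black white rare",
--             "legend",
--             "rare prime",
--             "illustration rare",
--         },
--         "weight": 10,
--     },
--     "ultra_rare": {
--         "names": {
--             "rare holo ex",
--             "rare holo gx",
--             "rare holo lv.x",
--             "rare holo v",
--             "rare holo vmax",
--             "rare holo vstar",
--             "ultra rare",
--             "double rare",
--             "rare ultra",
--             "shiny rare",
--             "amazing rare",
--             "radiant rare",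
--             "classic collection",
--             "ace spec rare",
--             "promo",
--         },
--         "weight": 4,
--     },
--     "secret_rare": {
--         "names": {
--             "rare shiny gx",
--             "rare rainbow",
--             "rare secret",
--             "shiny ultra rare",
--             "special illustration rare",
--             "hyper rare",
--         },
--         "weight": 1,
--     },
-- }
--
-- # Flat lookup table: lowercased rarity name -> tier, built once.
-- # setdefault keeps the FIRST tier that lists a name, matching A's first-match break.
-- NAME_TO_TIER: Dict[str, str] = {}
-- for _tier, _data in RARITY_TIERS.items():
--     for _name in _data["names"]:
--         NAME_TO_TIER.setdefault(_name.lower(), _tier)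
--
--
-- def _categorize_cards(cards: List[dict]) -> Dict[str, List[dict]]:
--     # Stage 1: tag each card with its tier (dropping unrecognised rarities).
--     tagged = [(NAME_TO_TIER.get(card.get("rarity", "").lower()), card) for card in cards]
--     tagged = [(t, c) for t, c in tagged if t is not None]
--     # Stage 2: one group per tier, tiers in order of first appearance.
--     categorized = defaultdict(list)
--     for tier in dict.fromkeys(t for t, _ in tagged):
--         categorized[tier] = [c for t, c in tagged if t == tier]
--     return categorized
-- ===== Notes on version B (the rewrite author's own statement) =====
-- stated objective: alternative
-- what changed: B replaces A's per-card inner loop over tiers (with a dict mutated in place) by a staged pipeline: a flat name->tier table built once, then a pass tagging each card with its tier, then one filter pass per first-appearing tier to build the groups.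
import Mathlib
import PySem

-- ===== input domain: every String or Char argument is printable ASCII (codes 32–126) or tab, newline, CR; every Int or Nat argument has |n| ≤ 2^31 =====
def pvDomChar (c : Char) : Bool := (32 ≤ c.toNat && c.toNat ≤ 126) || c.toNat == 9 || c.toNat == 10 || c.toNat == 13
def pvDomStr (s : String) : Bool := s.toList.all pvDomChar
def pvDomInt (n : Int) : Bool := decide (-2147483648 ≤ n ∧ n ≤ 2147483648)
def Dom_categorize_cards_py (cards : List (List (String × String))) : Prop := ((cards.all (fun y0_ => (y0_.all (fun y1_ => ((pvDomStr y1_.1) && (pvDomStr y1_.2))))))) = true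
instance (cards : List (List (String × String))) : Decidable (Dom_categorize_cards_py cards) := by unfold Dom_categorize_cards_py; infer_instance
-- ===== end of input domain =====

-- B replaces A's dict-mutating loop with an inner scan over tiers by a staged pipeline:
-- a flat name→tier table built once, then tag each card with its tier, then one group
-- per first-occurrence tier via filters; objective: simpler (no per-card inner loop).

-- ===== PORT A =====
-- RARITY_TIERS: tier name ↦ its "names" set (the distinct elements; the unused "weight" field is omitted)
def pvRarityTiers : List (String × List String) :=
  [("common", ["common"]),
   ("uncommon", ["uncommon"]),
   ("rare", ["rare", "rare holo", "rare ace", "rare break", "rare prism star",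
             "rare shining", "rare shiny", "rare holo star", "trainer gallery rare holo",
             "black white rare", "legend", "rare prime", "illustration rare"]),
   ("ultra_rare", ["rare holo ex", "rare holo gx", "rare holo lv.x", "rare holo v",
                   "rare holo vmax", "rare holo vstar", "ultra rare", "double rare",
                   "rare ultra", "shiny rare", "amazing rare", "radiant rare",
                   "classic collection", "ace spec rare", "promo"]),
   ("secret_rare", ["rare shiny gx", "rare rainbow", "rare secret", "shiny ultra rare",
                    "special illustration rare", "hyper rare"])]

-- A's inner 'for tier, data in RARITY_TIERS.items(): if rarity in {r.lower() for r in data["names"]}: …; break'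
def pvTierOf (rarity : String) : List (String × List String) → Option String
  | [] => none
  | (tier, names) :: rest =>
      if PySem.Set.contains (PySem.Set.ofList (names.map PySem.Str.lower)) rarity then some tier
      else pvTierOf rarity rest

def categorize_cards_py (cards : List (List (String × String))) : List (String × List (List (String × String))) :=
  (cards.foldl (fun categorized card =>
      -- rarity = card.get("rarity", "").lower()  (assoc-list dict: first match)
      match pvTierOf (PySem.Str.lower ((List.lookup "rarity" card).getD "")) pvRarityTiers with
      | some tier => categorized.modify tier [] (· ++ [card])   -- categorized[tier].append(card)
      | none => categorized)
    PySem.Dict.empty).items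

-- ===== PORT B =====
-- NAME_TO_TIER: built once; setdefault keeps the FIRST tier listing a name
def pvNameToTier : PySem.Dict String String :=
  pvRarityTiers.foldl
    (fun d p => (p.2.map PySem.Str.lower).foldl (fun d n => d.setdefault n p.1) d)
    PySem.Dict.empty

def categorize_cards_py_alt (cards : List (List (String × String))) : List (String × List (List (String × String))) :=
  -- tagged = [(t, c) …]: pair each card with its tier, drop unrecognised rarities
  let tagged : List (String × List (String × String)) :=
    cards.filterMap (fun card =>
      (pvNameToTier.get? (PySem.Str.lower ((List.lookup "rarity" card).getD ""))).map
        (fun t => (t, card)))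
  -- dict.fromkeys: tiers in order of first appearance; one filter pass per tier
  (PySem.List.dedup (tagged.map (·.1))).map
    (fun tier => (tier, (tagged.filter (fun p => p.1 == tier)).map (·.2)))

-- ===== PRECONDITION & SPEC =====
def Spec_categorize_cards_py (cards : List (List (String × String))) (out : List (String × List (List (String × String)))) : Prop := out = categorize_cards_py_alt cards
instance (cards : List (List (String × String))) (out : List (String × List (List (String × String)))) : Decidable (Spec_categorize_cards_py cards out) := by unfold Spec_categorize_cards_py; infer_instance

-- ===== CLAIM (what is proved, stated in full; the proofs are below) =====
def Claim_equal_categorize_cards_py : Prop := ∀ (cards : List (List (String × String))), Dom_categorize_cards_py cards → Spec_categorize_cards_py cards (categorize_cards_py cards)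

-- ===== LEMMAS AND PROOFS =====

-- lookup after a setdefault loop: existing bindings win; otherwise first tier whose names contain r
lemma get?_foldl_setdefault (ns : List String) (d : PySem.Dict String String) (t r : String) :
    (ns.foldl (fun d n => d.setdefault n t) d).get? r =
      (match d.get? r with
       | some v => some v
       | none => if r ∈ ns then some t else none) := by
  induction ns generalizing d with
  | nil => cases h : d.get? r <;> simp [h]
  | cons n ns ih =>
      simp only [List.foldl_cons, ih]
      by_cases h : r = n
      · subst h
        rw [PySem.Dict.get?_setdefault_self]
        cases d.get? r <;> simp [Option.getD]
      · rw [PySem.Dict.get?_setdefault_of_ne d t h]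
        cases d.get? r <;> simp [h]

lemma get?_build (ts : List (String × List String)) (d : PySem.Dict String String) (r : String) :
    (ts.foldl (fun d p => (p.2.map PySem.Str.lower).foldl (fun d n => d.setdefault n p.1) d) d).get? r =
      (match d.get? r with
       | some v => some v
       | none => pvTierOf r ts) := by
  induction ts generalizing d with
  | nil => cases h : d.get? r <;> simp [h, pvTierOf]
  | cons p ts ih =>
      obtain ⟨t, ns⟩ := p
      simp only [List.foldl_cons, ih, get?_foldl_setdefault]
      cases hd : d.get? r with
      | some v => rfl
      | none =>
          simp only [pvTierOf]
          by_cases h : r ∈ ns.map PySem.Str.lower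
          · rw [if_pos h, if_pos]
            rw [PySem.Set.contains_iff, PySem.Set.mem_ofList]
            exact h
          · rw [if_neg h, if_neg]
            intro hc
            exact h ((PySem.Set.mem_ofList _ _).mp ((PySem.Set.contains_iff _ _).mp hc))

lemma nameToTier_eq_tierOf (r : String) : pvNameToTier.get? r = pvTierOf r pvRarityTiers := by
  unfold pvNameToTier
  rw [get?_build, PySem.Dict.get?_empty]

-- A's fold over cards, skipping unmatched rarities, IS a grouping fold over the tagged pairs
lemma foldl_match_eq_foldl_filterMap (f : List (String × String) → Option String)
    (cards : List (List (String × String))) (d : PySem.Dict String (List (List (String × String)))) :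
    cards.foldl (fun categorized card =>
        match f card with
        | some tier => categorized.modify tier [] (· ++ [card])
        | none => categorized) d =
      (cards.filterMap (fun card => (f card).map (fun t => (t, card)))).foldl
        (fun categorized p => categorized.modify p.1 [] (· ++ [p.2])) d := by
  induction cards generalizing d with
  | nil => rfl
  | cons c cs ih =>
      simp only [List.foldl_cons, List.filterMap_cons]
      cases f c <;> simp [ih]

-- ===== VERDICT (by name: the statement is the Claim_ definition above) =====
theorem categorize_cards_py_spec : Claim_equal_categorize_cards_py := by
  intro cards _
  unfold Spec_categorize_cards_py categorize_cards_py categorize_cards_py_alt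
  simp only [← nameToTier_eq_tierOf]
  rw [foldl_match_eq_foldl_filterMap]
  set l := cards.filterMap (fun card =>
      (pvNameToTier.get? (PySem.Str.lower ((List.lookup "rarity" card).getD ""))).map
        (fun t => (t, card))) with hl
  rw [PySem.Dict.items_eq_map_keys _
        (PySem.Dict.nodup_keys_foldl_modify_key l (·.1) [] (fun _ p => (· ++ [p.2])) _
          PySem.Dict.nodup_keys_empty) []]
  rw [PySem.Dict.keys_foldl_modify_key, PySem.Dict.keys_empty, PySem.Set.update_nil_left,
      ← PySem.List.dedup_eq_ofList]
  refine List.map_congr_left (fun k _ => ?_)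
  rw [PySem.Dict.getD_foldl_modify_append, PySem.Dict.getD_empty]
  simp
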